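-- pv_equiv track=rewrite | github.com/RijaFaisal/CardiacTwin | ml/cross_dataset_eval.py | get_ptbxl_ground_truth
-- ===== SOURCE A (Python) =====
-- PTBXL_SCP_MAP = {
--     # ── Normal ──────────────────────────────────────────────────────────────
--     'NORM':  0,   # Normal ECG
--     'SR':    0,   # Sinus rhythm
--
--     # ── Bundle Branch Block ──────────────────────────────────────────────────
--     'CLBBB': 1,   # Complete LBBB
--     'CRBBB': 1,   # Complete RBBB
--     'ILBBB': 1,   # Incomplete LBBB
--     'IRBBB': 1,   # Incomplete RBBB
--     'IVCD':  1,   # Intraventricular conduction delay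
--
--     # ── Ventricular ─────────────────────────────────────────────────────────
--     'PVC':   2,   # Premature ventricular contraction
--     'BIGU':  2,   # Bigeminy
--     'TRIGU': 2,   # Trigeminy
--     'VT':    2,   # Ventricular tachycardia
--     'VFIB':  2,   # Ventricular fibrillation
--
--     # ── Atrial ──────────────────────────────────────────────────────────────
--     'AFIB':  3,   # Atrial fibrillation
--     'AFLT':  3,   # Atrial flutter
--     'PAC':   3,   # Premature atrial contraction
--     'PSVT':  3,   # Paroxysmal supraventricular tachycardia
--     'SVTAC': 3,   # Supraventricular tachycardia
-- }
--
-- CLASS_PRIORITY = [2, 3, 1, 0, 4]  # Ventricular > Atrial > BBB > Normal > Other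
--
-- def get_ptbxl_ground_truth(scp_codes: dict) -> tuple[int, str]:
--     """
--     Map a PTB-XL SCP-codes dict to one of our 5 classes.
--
--     Strategy:
--       1. For every code with likelihood > 0, look up PTBXL_SCP_MAP.
--       2. Among all matched classes, apply CLASS_PRIORITY ordering.
--       3. If no code maps to a known class → Other (4).
--
--     The SCP likelihood scores (0–100) indicate how confident annotators were.
--     We use >0 as the threshold so that co-occurring secondary diagnoses are
--     considered, but the priority ordering ensures the most clinically
--     significant arrhythmia class wins.
--     """
--     mapped = set()
--     for code, score in scp_codes.items():
--         if score > 0 and code in PTBXL_SCP_MAP: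
--             mapped.add(PTBXL_SCP_MAP[code])
--
--     if not mapped:
--         return 4, 'Other (unmapped SCP codes)'
--
--     for cls in CLASS_PRIORITY:
--         if cls in mapped:
--             # Build a readable label from the contributing codes
--             contributing = [c for c, s in scp_codes.items()
--                             if s > 0 and PTBXL_SCP_MAP.get(c) == cls]
--             return cls, '+'.join(contributing)
--
--     return 4, 'Other'
-- ===== SOURCE B (Python) =====
-- PTBXL_SCP_MAP = {
--     'NORM':  0, 'SR': 0,
--     'CLBBB': 1, 'CRBBB': 1, 'ILBBB': 1, 'IRBBB': 1, 'IVCD': 1,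
--     'PVC':   2, 'BIGU': 2, 'TRIGU': 2, 'VT': 2, 'VFIB': 2,
--     'AFIB':  3, 'AFLT': 3, 'PAC': 3, 'PSVT': 3, 'SVTAC': 3,
-- }
--
-- CLASS_PRIORITY = [2, 3, 1, 0, 4]
--
--
-- def get_ptbxl_ground_truth(scp_codes: dict) -> tuple[int, str]:
--     """One grouping pass: bucket contributing codes by class, then pick the
--     highest-priority bucket. No second scan over scp_codes."""
--     groups = {}
--     for code, score in scp_codes.items():
--         cls = PTBXL_SCP_MAP.get(code)
--         if score > 0 and cls is not None:
--             groups.setdefault(cls, []).append(code)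
--     if not groups:
--         return 4, 'Other (unmapped SCP codes)'
--     for cls in CLASS_PRIORITY:
--         if cls in groups:
--             return cls, '+'.join(groups[cls])
--     return 4, 'Other'
-- ===== Notes on version B (the rewrite author's own statement) =====
-- stated objective: simpler
-- what changed: B replaces A's two-phase strategy (build a set of matched classes, then rescan scp_codes to collect the winner's contributing codes) with a single grouping pass that buckets contributing codes by class in a dict, then returns the first priority class with its pre-built bucket.
import Mathlib
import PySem

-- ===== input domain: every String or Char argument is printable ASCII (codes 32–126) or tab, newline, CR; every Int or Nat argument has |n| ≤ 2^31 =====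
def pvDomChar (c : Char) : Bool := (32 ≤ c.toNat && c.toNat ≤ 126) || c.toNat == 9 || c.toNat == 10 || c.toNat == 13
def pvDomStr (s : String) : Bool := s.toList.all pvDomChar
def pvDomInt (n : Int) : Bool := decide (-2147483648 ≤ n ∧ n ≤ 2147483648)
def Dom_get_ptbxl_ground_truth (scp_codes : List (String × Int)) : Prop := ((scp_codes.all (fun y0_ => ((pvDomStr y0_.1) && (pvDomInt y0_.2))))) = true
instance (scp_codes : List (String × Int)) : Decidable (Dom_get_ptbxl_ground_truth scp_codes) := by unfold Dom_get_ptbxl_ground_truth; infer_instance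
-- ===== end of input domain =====

-- B merges A's set-building pass and its separate contributing-codes rescan into one
-- grouping pass (codes bucketed by class in a dict), then picks the first priority class;
-- objective: simpler (one pass instead of a scan per winner).

-- module-level constants shared by A and B (as in the Python module)
def PTBXL_SCP_MAP : PySem.Dict String Int := PySem.Dict.ofList
  [("NORM", 0), ("SR", 0),
   ("CLBBB", 1), ("CRBBB", 1), ("ILBBB", 1), ("IRBBB", 1), ("IVCD", 1),
   ("PVC", 2), ("BIGU", 2), ("TRIGU", 2), ("VT", 2), ("VFIB", 2),
   ("AFIB", 3), ("AFLT", 3), ("PAC", 3), ("PSVT", 3), ("SVTAC", 3)]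

def CLASS_PRIORITY : List Int := [2, 3, 1, 0, 4]

-- ===== PORT A =====
-- loop body: `if score > 0 and code in PTBXL_SCP_MAP: mapped.add(PTBXL_SCP_MAP[code])`
-- (PTBXL_SCP_MAP[code] is safe under the `code in` guard, so getD _ 0 is exact here)
def pvStepA (m : PySem.Set Int) (p : String × Int) : PySem.Set Int :=
  if decide (p.2 > 0) && PTBXL_SCP_MAP.contains p.1 then
    PySem.Set.add m (PTBXL_SCP_MAP.getD p.1 0)
  else m

-- `for cls in CLASS_PRIORITY: if cls in mapped: …` with the contributing-codes rescan
def pvALoop (scp_codes : List (String × Int)) (mapped : PySem.Set Int) :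
    List Int → Int × String
  | [] => (4, "Other")
  | cls :: rest =>
    if PySem.Set.contains mapped cls then
      (cls, PySem.Str.join "+"
        ((scp_codes.filter (fun p => decide (p.2 > 0) && (PTBXL_SCP_MAP.get? p.1 == some cls))).map (·.1)))
    else pvALoop scp_codes mapped rest

def get_ptbxl_ground_truth (scp_codes : List (String × Int)) : Int × String :=
  let mapped := scp_codes.foldl pvStepA PySem.Set.empty
  if mapped = [] then (4, "Other (unmapped SCP codes)")
  else pvALoop scp_codes mapped CLASS_PRIORITY

-- ===== PORT B =====
-- loop body: `cls = PTBXL_SCP_MAP.get(code); if score > 0 and cls is not None: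
--             groups.setdefault(cls, []).append(code)`  (setdefault+append = Dict.modify)
def pvStepB (g : PySem.Dict Int (List String)) (p : String × Int) :
    PySem.Dict Int (List String) :=
  let cls? := PTBXL_SCP_MAP.get? p.1
  if decide (p.2 > 0) && cls?.isSome then
    g.modify (cls?.getD 0) [] (fun l => l ++ [p.1])
  else g

-- `for cls in CLASS_PRIORITY: if cls in groups: return cls, '+'.join(groups[cls])`
def pvBLoop (groups : PySem.Dict Int (List String)) : List Int → Int × String
  | [] => (4, "Other")
  | cls :: rest =>
    if groups.contains cls then (cls, PySem.Str.join "+" (groups.getD cls []))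
    else pvBLoop groups rest

def get_ptbxl_ground_truth_alt (scp_codes : List (String × Int)) : Int × String :=
  let groups := scp_codes.foldl pvStepB PySem.Dict.empty
  if groups.size = 0 then (4, "Other (unmapped SCP codes)")
  else pvBLoop groups CLASS_PRIORITY

-- ===== PRECONDITION & SPEC =====
def Spec_get_ptbxl_ground_truth (scp_codes : List (String × Int)) (out : Int × String) : Prop := out = get_ptbxl_ground_truth_alt scp_codes
instance (scp_codes : List (String × Int)) (out : Int × String) : Decidable (Spec_get_ptbxl_ground_truth scp_codes out) := by unfold Spec_get_ptbxl_ground_truth; infer_instance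

-- ===== CLAIM (what is proved, stated in full; the proofs are below) =====
def Claim_equal_get_ptbxl_ground_truth : Prop := ∀ (scp_codes : List (String × Int)), Dom_get_ptbxl_ground_truth scp_codes → Spec_get_ptbxl_ground_truth scp_codes (get_ptbxl_ground_truth scp_codes)

-- ===== LEMMAS AND PROOFS =====

-- an item contributes iff its score is positive and its code is a known SCP code
def pvHit (p : String × Int) : Bool := decide (p.2 > 0) && PTBXL_SCP_MAP.contains p.1

-- an item contributes to class `cls` (A's rescan predicate)
def pvPred (cls : Int) (p : String × Int) : Bool :=
  decide (p.2 > 0) && (PTBXL_SCP_MAP.get? p.1 == some cls)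

lemma pvStepB_eq (g : PySem.Dict Int (List String)) (p : String × Int) :
    pvStepB g p =
      if pvHit p then g.modify (PTBXL_SCP_MAP.getD p.1 0) [] (fun l => l ++ [p.1]) else g := by
  simp [pvStepB, pvHit, PySem.Dict.contains_eq_isSome_get?, PySem.Dict.getD_eq_get?_getD]

lemma pvStepA_eq (m : PySem.Set Int) (p : String × Int) :
    pvStepA m p = if pvHit p then PySem.Set.add m (PTBXL_SCP_MAP.getD p.1 0) else m := rfl

lemma pvPred_of_hit (p : String × Int) (h : pvHit p = true) (cls : Int) :
    pvPred cls p = (PTBXL_SCP_MAP.getD p.1 0 == cls) := by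
  simp only [pvHit, Bool.and_eq_true, PySem.Dict.contains_eq_isSome_get?] at h
  obtain ⟨h1, h2⟩ := h
  obtain ⟨c, hc⟩ := Option.isSome_iff_exists.mp h2
  simp [pvPred, hc, h1, PySem.Dict.getD_eq_get?_getD]

lemma pvPred_of_not_hit (p : String × Int) (h : pvHit p = false) (cls : Int) :
    pvPred cls p = false := by
  simp only [pvHit, Bool.and_eq_false_iff, PySem.Dict.contains_eq_isSome_get?] at h
  rcases h with h | h
  · simp [pvPred, h]
  · simp only [Option.isSome_eq_false_iff, Option.isNone_iff_eq_none] at h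
    simp [pvPred, h]

-- A's set membership after the fold
lemma pvA_contains (l : List (String × Int)) (m : PySem.Set Int) (cls : Int) :
    PySem.Set.contains (l.foldl pvStepA m) cls
      = (PySem.Set.contains m cls || l.any (pvPred cls)) := by
  induction l generalizing m with
  | nil => simp
  | cons p t ih =>
    simp only [List.foldl_cons, List.any_cons, ih, pvStepA_eq]
    cases h : pvHit p with
    | false => simp [pvPred_of_not_hit p h]
    | true =>
      rw [Bool.eq_iff_iff]
      simp [pvPred_of_hit p h, PySem.Set.mem_add]
      try tauto

-- B's dict membership after the fold
lemma pvB_contains (l : List (String × Int)) (g : PySem.Dict Int (List String)) (cls : Int) :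
    (l.foldl pvStepB g).contains cls = (g.contains cls || l.any (pvPred cls)) := by
  induction l generalizing g with
  | nil => simp
  | cons p t ih =>
    simp only [List.foldl_cons, List.any_cons, ih, pvStepB_eq]
    cases h : pvHit p with
    | false => simp [pvPred_of_not_hit p h]
    | true =>
      rw [Bool.eq_iff_iff]
      simp [pvPred_of_hit p h, PySem.Dict.contains_modify]
      try tauto

-- B's bucket for `cls` is exactly A's contributing-codes list
lemma pvB_getD (l : List (String × Int)) (g : PySem.Dict Int (List String)) (cls : Int) :
    (l.foldl pvStepB g).getD cls [] = g.getD cls [] ++ (l.filter (pvPred cls)).map (·.1) := by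
  induction l generalizing g with
  | nil => simp
  | cons p t ih =>
    simp only [List.foldl_cons, List.filter_cons, ih, pvStepB_eq]
    cases h : pvHit p with
    | false => simp [pvPred_of_not_hit p h]
    | true =>
      rw [pvPred_of_hit p h]
      by_cases hc : PTBXL_SCP_MAP.getD p.1 0 = cls
      · simp [hc]
      · simp [hc, PySem.Dict.getD_modify, Ne.symm hc]

lemma pvAddNe (s : PySem.Set Int) (x : Int) : PySem.Set.add s x ≠ [] := by
  cases s with
  | nil => simp [PySem.Set.add]
  | cons a t => unfold PySem.Set.add; split <;> simp

lemma pvA_ne (l : List (String × Int)) (m : PySem.Set Int) (hm : m ≠ []) :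
    l.foldl pvStepA m ≠ [] := by
  induction l generalizing m with
  | nil => exact hm
  | cons p t ih =>
    simp only [List.foldl_cons, pvStepA_eq]
    by_cases h : pvHit p = true
    · rw [if_pos h]; exact ih _ (pvAddNe m _)
    · rw [if_neg h]; exact ih m hm

lemma pvA_empty (l : List (String × Int)) (m : PySem.Set Int) :
    (l.foldl pvStepA m = []) ↔ (m = [] ∧ l.all (fun p => !pvHit p)) := by
  induction l generalizing m with
  | nil => simp
  | cons p t ih =>
    simp only [List.foldl_cons, List.all_cons, pvStepA_eq]
    by_cases h : pvHit p = true
    · rw [if_pos h]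
      constructor
      · intro hh; exact absurd hh (pvA_ne t _ (pvAddNe m _))
      · simp [h]
    · rw [if_neg h]; simp [ih, Bool.not_eq_true _ ▸ h]

lemma pvModifySizeNe (d : PySem.Dict Int (List String)) (k : Int) (f : List String → List String) :
    (d.modify k [] f).size ≠ 0 := by
  have hk : (d.modify k [] f).contains k = true := by
    simp [PySem.Dict.contains_modify]
  intro h
  rw [PySem.Dict.contains_eq_isSome_get?] at hk
  cases hd : (d.modify k [] f).items with
  | nil =>
    have : (d.modify k [] f).get? k = none := by
      rw [PySem.Dict.get?_eq_none_iff_not_mem_keys]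
      simp [PySem.Dict.keys, hd]
    rw [this] at hk; simp at hk
  | cons a t => simp [PySem.Dict.size, hd] at h

lemma pvB_sizeNe (l : List (String × Int)) (g : PySem.Dict Int (List String)) (hg : g.size ≠ 0) :
    (l.foldl pvStepB g).size ≠ 0 := by
  induction l generalizing g with
  | nil => exact hg
  | cons p t ih =>
    simp only [List.foldl_cons, pvStepB_eq]
    by_cases h : pvHit p = true
    · rw [if_pos h]; exact ih _ (pvModifySizeNe g _ _)
    · rw [if_neg h]; exact ih g hg

lemma pvB_empty (l : List (String × Int)) (g : PySem.Dict Int (List String)) :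
    ((l.foldl pvStepB g).size = 0) ↔ (g.size = 0 ∧ l.all (fun p => !pvHit p)) := by
  induction l generalizing g with
  | nil => simp
  | cons p t ih =>
    simp only [List.foldl_cons, List.all_cons, pvStepB_eq]
    by_cases h : pvHit p = true
    · rw [if_pos h]
      constructor
      · intro hh; exact absurd hh (pvB_sizeNe t _ (pvModifySizeNe g _ _))
      · simp [h]
    · rw [if_neg h]; simp [ih, Bool.not_eq_true _ ▸ h]

-- the two priority loops agree when membership and buckets agree
lemma pvLoop_eq (scp : List (String × Int)) (m : PySem.Set Int)
    (g : PySem.Dict Int (List String))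
    (hmem : ∀ cls, PySem.Set.contains m cls = g.contains cls)
    (hval : ∀ cls, g.getD cls []
      = (scp.filter (fun p => decide (p.2 > 0) && (PTBXL_SCP_MAP.get? p.1 == some cls))).map (·.1)) :
    ∀ pr : List Int, pvALoop scp m pr = pvBLoop g pr := by
  intro pr
  induction pr with
  | nil => rfl
  | cons cls rest ih =>
    simp only [pvALoop, pvBLoop, hmem cls, hval cls]
    split <;> [rfl; exact ih]

-- ===== VERDICT (by name: the statement is the Claim_ definition above) =====
theorem get_ptbxl_ground_truth_spec : Claim_equal_get_ptbxl_ground_truth := by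
  unfold Claim_equal_get_ptbxl_ground_truth
  intro scp _
  unfold Spec_get_ptbxl_ground_truth get_ptbxl_ground_truth get_ptbxl_ground_truth_alt
  simp only []
  have hempty : (scp.foldl pvStepA PySem.Set.empty = [])
      ↔ ((scp.foldl pvStepB PySem.Dict.empty).size = 0) := by
    rw [pvA_empty, pvB_empty]
    simp [PySem.Set.empty]
  by_cases h : scp.foldl pvStepA PySem.Set.empty = []
  · rw [if_pos h, if_pos (hempty.mp h)]
  · rw [if_neg h, if_neg (fun hh => h (hempty.mpr hh))]
    exact pvLoop_eq scp _ _
      (fun cls => by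
        rw [pvA_contains, pvB_contains]
        simp [PySem.Set.empty])
      (fun cls => by
        rw [pvB_getD]
        simp only [PySem.Dict.getD_empty, List.nil_append]
        rfl)
      CLASS_PRIORITY
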